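-- pv_equiv track=rewrite | github.com/Lantuu/perf_code | perf_code/get_fullName/tensorflow2.py | get_api_name
-- ===== SOURCE A (Python) =====
-- def get_api_name(link):
--     names = link.split('/')  # 名字
--     full_name = ''
--     flag = False
--     for name in names:
--         if name == 'tf' and not flag:
--             full_name = 'tensorflow'
--             flag = True
--         elif flag:
--             full_name = full_name + '.' + name
--         else:
--             continue
--     return full_name
-- ===== SOURCE B (Python) =====
-- def get_api_name(link):
--     names = link.split('/')
--     if 'tf' not in names:
--         return ''
--     idx = names.index('tf')
--     return '.'.join(['tensorflow'] + names[idx + 1:])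
-- ===== Notes on version B (the rewrite author's own statement) =====
-- stated objective: simpler
-- what changed: Replaces the boolean-flag accumulator loop with find-then-slice-then-join: locate the pivot component via list.index and build the dotted name by joining the tail slice in one step.
import Mathlib
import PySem

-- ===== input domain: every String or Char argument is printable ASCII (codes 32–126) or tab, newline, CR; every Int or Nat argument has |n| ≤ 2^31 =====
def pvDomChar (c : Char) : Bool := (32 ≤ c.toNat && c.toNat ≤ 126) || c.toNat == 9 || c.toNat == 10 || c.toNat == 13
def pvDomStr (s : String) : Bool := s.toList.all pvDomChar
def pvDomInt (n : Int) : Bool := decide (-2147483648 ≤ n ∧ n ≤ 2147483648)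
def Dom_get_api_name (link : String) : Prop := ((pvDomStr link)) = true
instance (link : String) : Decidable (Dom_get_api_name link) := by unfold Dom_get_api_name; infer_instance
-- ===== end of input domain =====

-- B replaces A's boolean-flag accumulator loop by find-first-'tf', slice the tail, join with '.' (objective: simpler).

-- ===== PORT A =====
-- A's loop: state (full_name, flag), one step per name, branches in A's order.
def get_api_name (link : String) : String :=
  let names := PySem.Chars.splitOn link.toList "/".toList
  let st := names.foldl
    (fun (st : List Char × Bool) name =>
      if name = "tf".toList ∧ st.2 = false then ("tensorflow".toList, true)
      else if st.2 = true then (st.1 ++ ".".toList ++ name, st.2)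
      else st)
    ([], false)
  String.ofList st.1

-- ===== PORT B =====
def get_api_name_alt (link : String) : String :=
  let names := PySem.Chars.splitOn link.toList "/".toList
  match PySem.List.index? names "tf".toList with
  | none => ""
  | some idx =>
      String.ofList (PySem.Chars.join ".".toList ("tensorflow".toList :: names.drop (idx + 1)))

-- ===== PRECONDITION & SPEC =====
def Spec_get_api_name (link : String) (out : String) : Prop := out = get_api_name_alt link
instance (link : String) (out : String) : Decidable (Spec_get_api_name link out) := by unfold Spec_get_api_name; infer_instance

-- ===== CLAIM (what is proved, stated in full; the proofs are below) =====
def Claim_equal_get_api_name : Prop := ∀ (link : String), Dom_get_api_name link → Spec_get_api_name link (get_api_name link)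

-- ===== LEMMAS AND PROOFS =====

def pvStepA (st : List Char × Bool) (name : List Char) : List Char × Bool :=
  if name = "tf".toList ∧ st.2 = false then ("tensorflow".toList, true)
  else if st.2 = true then (st.1 ++ ".".toList ++ name, st.2)
  else st

-- with flag false and 'tf' absent, the state never changes
theorem pvFoldA_no_tf (l : List (List Char)) (s : List Char)
    (h : "tf".toList ∉ l) : l.foldl pvStepA (s, false) = (s, false) := by
  induction l generalizing s with
  | nil => rfl
  | cons x xs ih =>
      simp only [List.mem_cons, not_or] at h
      simp only [List.foldl_cons, pvStepA]
      rw [if_neg (by simpa using fun hx => h.1 hx.symm)]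
      exact ih s h.2

-- with flag true, the fold appends '.' ++ name for each remaining name
theorem pvFoldA_flag (l : List (List Char)) (s : List Char) :
    l.foldl pvStepA (s, true) = (s ++ l.flatMap (fun n => '.' :: n), true) := by
  induction l generalizing s with
  | nil => simp
  | cons x xs ih =>
      simp only [List.foldl_cons, pvStepA, and_false, if_false, Bool.true_eq_false,
        if_true, reduceIte, ih]
      simp

theorem pvJoinDot (x : List Char) (l : List (List Char)) :
    PySem.Chars.join ".".toList (x :: l) = x ++ l.flatMap (fun n => '.' :: n) := by
  induction l generalizing x with
  | nil => simp [PySem.Chars.join_singleton]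
  | cons y ys ih =>
      rw [PySem.Chars.join_cons_cons, ih]
      simp

-- ===== VERDICT (by name: the statement is the Claim_ definition above) =====
theorem get_api_name_spec : Claim_equal_get_api_name := by
  intro link _
  unfold Spec_get_api_name get_api_name get_api_name_alt
  set names := PySem.Chars.splitOn link.toList "/".toList with hn
  show String.ofList (names.foldl pvStepA ([], false)).1 = _
  rcases h : PySem.List.index? names "tf".toList with _ | idx
  · simp only [h]
    rw [PySem.List.index?_eq_none_iff] at h
    rw [pvFoldA_no_tf names [] h]
  · simp only [h]
    obtain ⟨pre, suf, hsplit, hlen, hpre⟩ := (PySem.List.index?_eq_some_iff names _ idx).mp h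
    simp only [hsplit, List.foldl_append, List.foldl_cons]
    rw [pvFoldA_no_tf pre [] hpre]
    have hstep : pvStepA ([], false) ("tf".toList) = ("tensorflow".toList, true) := by
      simp [pvStepA]
    rw [hstep, pvFoldA_flag]
    have hdrop : (pre ++ "tf".toList :: suf).drop (idx + 1) = suf := by
      rw [← hlen, show pre.length + 1 = pre.length + 1 from rfl]
      rw [← List.drop_drop, List.drop_left]
      rfl
    rw [hdrop, pvJoinDot]
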